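-- pv_equiv track=rewrite | github.com/Dapman/InDE_5_1b | app/ems/adl_generator.py | _build_transition_map
-- ===== SOURCE A (Python) =====
-- from typing import Dict, List, Optional, Any, Tuple
--
-- def _build_transition_map(transition_data: List[Dict]) -> Dict[str, List[Dict]]:
--     """Build map of phase_id -> transitions from that phase."""
--     transition_map = {}
--     for trans in transition_data:
--         from_phase = trans.get("from_phase", "")
--         if from_phase not in transition_map:
--             transition_map[from_phase] = []
--         transition_map[from_phase].append(trans)
--     return transition_map
-- ===== SOURCE B (Python) =====
-- def _build_transition_map(transition_data):
--     """Build map of phase_id -> transitions from that phase.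
--
--     Two-pass alternative: first collect the distinct from_phase keys in
--     first-occurrence order, then build each group by filtering the input.
--     """
--     keys = list(dict.fromkeys(t.get("from_phase", "") for t in transition_data))
--     return {k: [t for t in transition_data if t.get("from_phase", "") == k]
--             for k in keys}
-- ===== Notes on version B (the rewrite author's own statement) =====
-- stated objective: alternative
-- what changed: Replaces the single-pass incremental dict bucketing with a two-pass scheme: an ordered dedup of the keys followed by one filter of the whole input per key, built as a dict comprehension.
import Mathlib
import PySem

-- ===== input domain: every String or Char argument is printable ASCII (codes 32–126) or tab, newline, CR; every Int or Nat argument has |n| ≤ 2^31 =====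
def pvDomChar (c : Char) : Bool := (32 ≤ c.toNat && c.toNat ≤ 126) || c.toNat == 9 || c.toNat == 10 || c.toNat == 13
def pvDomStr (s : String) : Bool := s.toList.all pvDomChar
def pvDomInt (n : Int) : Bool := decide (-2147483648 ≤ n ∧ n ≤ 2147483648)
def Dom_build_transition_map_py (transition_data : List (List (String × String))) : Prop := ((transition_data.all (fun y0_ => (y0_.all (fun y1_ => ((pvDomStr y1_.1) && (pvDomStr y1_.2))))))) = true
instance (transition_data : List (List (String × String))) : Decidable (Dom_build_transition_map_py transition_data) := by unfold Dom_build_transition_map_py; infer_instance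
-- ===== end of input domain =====

-- B replaces A's single-pass dict bucketing with dedup-the-keys-then-filter-per-key; alternative decomposition, same results.


-- trans.get("from_phase", "") — first-match lookup on the association list (Python dicts have unique keys)
def pvFromPhase (trans : List (String × String)) : String :=
  (PySem.Dict.mk trans).getD "from_phase" ""

-- ===== PORT A =====
def build_transition_map_py (transition_data : List (List (String × String))) : List (String × List (List (String × String))) :=
  (transition_data.foldl
    (fun (transition_map : PySem.Dict String (List (List (String × String)))) trans =>
      let from_phase := pvFromPhase trans
      let transition_map :=
        if transition_map.contains from_phase then transition_map
        else transition_map.insert from_phase []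
      transition_map.modify from_phase [] (fun l => l ++ [trans]))
    PySem.Dict.empty).items

-- ===== PORT B =====
def build_transition_map_py_alt (transition_data : List (List (String × String))) : List (String × List (List (String × String))) :=
  let keys := PySem.List.dedup (transition_data.map pvFromPhase)
  keys.map (fun k => (k, transition_data.filter (fun t => pvFromPhase t == k)))

-- ===== PRECONDITION & SPEC =====
def Spec_build_transition_map_py (transition_data : List (List (String × String))) (out : List (String × List (List (String × String)))) : Prop := out = build_transition_map_py_alt transition_data
instance (transition_data : List (List (String × String))) (out : List (String × List (List (String × String)))) : Decidable (Spec_build_transition_map_py transition_data out) := by unfold Spec_build_transition_map_py; infer_instance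

-- ===== CLAIM (what is proved, stated in full; the proofs are below) =====
def Claim_equal_build_transition_map_py : Prop := ∀ (transition_data : List (List (String × String))), Dom_build_transition_map_py transition_data → Spec_build_transition_map_py transition_data (build_transition_map_py transition_data)

-- ===== LEMMAS AND PROOFS =====

-- A's loop body ("insert [] if absent, then append") is one `modify` step.
theorem pv_step_eq_modify (d : PySem.Dict String (List (List (String × String))))
    (k : String) (f : List (List (String × String)) → List (List (String × String))) :
    (if d.contains k then d else d.insert k []).modify k [] f = d.modify k [] f := by
  split_ifs with h
  · rfl
  · have hb : d.contains k = false := by simpa using h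
    simp only [PySem.Dict.modify]
    rw [PySem.Dict.getD_insert_self, PySem.Dict.insert_insert_self,
        PySem.Dict.getD_of_not_contains d [] hb]

theorem build_transition_map_py_eq_modify_fold (l : List (List (String × String))) :
    build_transition_map_py l =
      (l.foldl (fun d t => d.modify (pvFromPhase t) [] (fun x => x ++ [t])) PySem.Dict.empty).items := by
  unfold build_transition_map_py
  congr 1
  apply PySem.List.foldl_congr_mem
  intro d t _
  exact pv_step_eq_modify d (pvFromPhase t) (fun x => x ++ [t])

-- ===== VERDICT (by name: the statement is the Claim_ definition above) =====
theorem build_transition_map_py_spec : Claim_equal_build_transition_map_py := by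
  intro l _
  show build_transition_map_py l = build_transition_map_py_alt l
  rw [build_transition_map_py_eq_modify_fold]
  set D := l.foldl (fun d t => d.modify (pvFromPhase t) [] (fun x => x ++ [t])) PySem.Dict.empty with hD
  have hnd : D.keys.Nodup := by
    rw [hD]
    exact PySem.Dict.nodup_keys_foldl_modify_key l pvFromPhase [] (fun _ t => fun x => x ++ [t])
      PySem.Dict.empty (by simp [pysem])
  have hkeys : D.keys = PySem.List.dedup (l.map pvFromPhase) := by
    rw [hD, PySem.Dict.keys_foldl_modify_key l pvFromPhase [] (fun _ t => fun x => x ++ [t])]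
    rfl
  have hget : ∀ c, D.getD c [] = l.filter (fun t => pvFromPhase t == c) := by
    intro c
    have hmap : D = (l.map (fun t => (pvFromPhase t, t))).foldl
        (fun d p => d.modify p.1 [] (fun x => x ++ [p.2])) PySem.Dict.empty := by
      rw [hD, List.foldl_map]
    rw [hmap, PySem.Dict.getD_foldl_modify_append, List.filter_map, List.map_map]
    simp [Function.comp_def]
  rw [PySem.Dict.items_eq_map_keys D hnd [], hkeys]
  unfold build_transition_map_py_alt
  apply List.map_congr_left
  intro k _
  rw [hget k]
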